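-- pv_equiv track=rewrite | github.com/PieroSierra/FlightsKB | src/services/ingest.py | _split_existing_headers
-- ===== SOURCE A (Python) =====
-- def _split_existing_headers(text: str) -> list[str]:
--     """Split text that already has ## headers."""
--     cards = []
--     current_card = []
--
--     for line in text.split("\n"):
--         if line.startswith("## ") and current_card:
--             cards.append("\n".join(current_card))
--             current_card = []
--         current_card.append(line)
--
--     if current_card:
--         cards.append("\n".join(current_card))
--
--     return cards
-- ===== SOURCE B (Python) =====
-- import re
--
-- def _split_existing_headers(text: str) -> list[str]:
--     """Split text that already has ## headers."""
--     return re.split(r'\n(?=## )', text)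
-- ===== Notes on version B (the rewrite author's own statement) =====
-- stated objective: idiomatic
-- what changed: Replaces the split-lines/accumulator/rejoin loop with a single regex split at every newline that is immediately followed by a '## ' header line.
import Mathlib
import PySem

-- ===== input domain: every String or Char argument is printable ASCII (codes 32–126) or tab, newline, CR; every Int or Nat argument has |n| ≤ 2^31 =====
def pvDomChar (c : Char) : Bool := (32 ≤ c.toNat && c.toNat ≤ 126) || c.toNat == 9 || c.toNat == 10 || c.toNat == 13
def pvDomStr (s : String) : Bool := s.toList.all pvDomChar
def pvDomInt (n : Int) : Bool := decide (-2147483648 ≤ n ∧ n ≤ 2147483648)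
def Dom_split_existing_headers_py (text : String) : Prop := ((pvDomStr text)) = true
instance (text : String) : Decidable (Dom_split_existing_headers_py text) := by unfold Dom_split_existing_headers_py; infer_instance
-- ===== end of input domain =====

-- ===== PORT A =====
-- B replaces A's split-lines/accumulator/rejoin loop with a single regex split at '\n(?=## )'; return values proved equal.
def split_existing_headers_py (text : String) : List String :=
  let lines := (PySem.Str.split? text "\n").getD []
  let st := lines.foldl (fun (st : List String × List String) line =>
      let st := if PySem.Str.startswith line "## " && !st.2.isEmpty then
          (st.1 ++ [PySem.Str.join "\n" st.2], ([] : List String)) else st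
      (st.1, st.2 ++ [line])) ([], [])
  if !st.2.isEmpty then st.1 ++ [PySem.Str.join "\n" st.2] else st.1

-- ===== PORT B =====
-- hand port (exact): re.split(r'\n(?=## )', text) — left-to-right scan, a cut at every '\n'
-- whose remainder starts with "## "; the lookahead consumes nothing, so the "## " stays.
def pvReSplitHdr : List Char → List Char → List String
  | [], acc => [String.ofList acc]
  | c :: rest, acc =>
      if c = '\n' && PySem.Chars.startswith rest ['#', '#', ' '] then
        String.ofList acc :: pvReSplitHdr rest []
      else
        pvReSplitHdr rest (acc ++ [c])

def split_existing_headers_py_alt (text : String) : List String :=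
  pvReSplitHdr text.toList []

-- ===== PRECONDITION & SPEC =====
def Spec_split_existing_headers_py (text : String) (out : List String) : Prop := out = split_existing_headers_py_alt text
instance (text : String) (out : List String) : Decidable (Spec_split_existing_headers_py text out) := by unfold Spec_split_existing_headers_py; infer_instance

-- ===== CLAIM (what is proved, stated in full; the proofs are below) =====
def Claim_equal_split_existing_headers_py : Prop := ∀ (text : String), Dom_split_existing_headers_py text → Spec_split_existing_headers_py text (split_existing_headers_py text)

-- ===== LEMMAS AND PROOFS =====

-- local intercalate unfoldings (no named Mathlib lemma matches these shapes)
theorem pvInter_singleton (s x : List Char) : s.intercalate [x] = x := by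
  simp [List.intercalate]

theorem pvInter_cons_cons (s x y : List Char) (xs : List (List Char)) :
    s.intercalate (x :: y :: xs) = x ++ s ++ s.intercalate (y :: xs) := by
  simp [List.intercalate, List.intersperse]

theorem pvInter_append_singleton (s y : List Char) (xs : List (List Char)) (hx : xs ≠ []) :
    s.intercalate (xs ++ [y]) = s.intercalate xs ++ s ++ y := by
  induction xs with
  | nil => exact absurd rfl hx
  | cons a as ih =>
      cases as with
      | nil => simp [pvInter_cons_cons, pvInter_singleton]
      | cons b bs =>
          have ih' := ih (by simp)
          rw [List.cons_append] at ih'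
          rw [List.cons_append, List.cons_append]
          conv_lhs => rw [pvInter_cons_cons]
          rw [ih', pvInter_cons_cons]
          simp

-- structural characterisation of splitting at '\n'
def pvSplitNl : List Char → List (List Char)
  | [] => [[]]
  | c :: rest =>
      if c = '\n' then [] :: pvSplitNl rest
      else match pvSplitNl rest with
        | [] => [[c]]
        | p :: ps => (c :: p) :: ps

theorem pvSplitNl_ne_nil (l : List Char) : pvSplitNl l ≠ [] := by
  cases l with
  | nil => simp [pvSplitNl]
  | cons c rest =>
      simp only [pvSplitNl]
      split
      · simp
      · split <;> simp

theorem pvSplitNl_no_nl (l : List Char) : ∀ p ∈ pvSplitNl l, '\n' ∉ p := by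
  induction l with
  | nil => simp [pvSplitNl]
  | cons c rest ih =>
      intro p hp
      simp only [pvSplitNl] at hp
      by_cases hc : c = '\n'
      · rw [if_pos hc] at hp
        rcases List.mem_cons.mp hp with h | h
        · simp [h]
        · exact ih p h
      · rw [if_neg hc] at hp
        cases hsp : pvSplitNl rest with
        | nil => exact absurd hsp (pvSplitNl_ne_nil rest)
        | cons q qs =>
            rw [hsp] at hp
            simp only [List.mem_cons] at hp
            rcases hp with h | h
            · subst h
              intro hm
              rcases List.mem_cons.mp hm with h | h
              · exact hc h.symm
              · exact ih q (hsp ▸ List.mem_cons_self ..) h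
            · exact ih p (hsp ▸ List.mem_cons_of_mem q h)

theorem pvSplitNl_intercalate (l : List Char) :
    List.intercalate ['\n'] (pvSplitNl l) = l := by
  induction l with
  | nil => simp [pvSplitNl, pvInter_singleton]
  | cons c rest ih =>
      simp only [pvSplitNl]
      split
      · rename_i hc
        subst hc
        cases hsp : pvSplitNl rest with
        | nil => exact absurd hsp (pvSplitNl_ne_nil rest)
        | cons q qs =>
            rw [hsp] at ih
            rw [pvInter_cons_cons, ih]
            simp
      · cases hsp : pvSplitNl rest with
        | nil => exact absurd hsp (pvSplitNl_ne_nil rest)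
        | cons q qs =>
            rw [hsp] at ih
            cases qs with
            | nil =>
                rw [pvInter_singleton] at ih
                rw [pvInter_singleton, ih]
            | cons q' qs' =>
                rw [pvInter_cons_cons] at ih
                rw [pvInter_cons_cons, List.cons_append, List.cons_append, ih]

-- helper for the fuel characterisation of PySem.Chars.splitOn.go
def pvConsHead (x : List Char) : List (List Char) → List (List Char)
  | [] => [x]
  | p :: ps => (x ++ p) :: ps

theorem pvGo_char (fuel : Nat) : ∀ (l cur : List Char) (out : List (List Char)),
    l.length < fuel →
    PySem.Chars.splitOn.go ['\n'] fuel l cur out =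
      out.reverse ++ pvConsHead cur.reverse (pvSplitNl l) := by
  induction fuel with
  | zero => intro l cur out h; omega
  | succ f ih =>
      intro l cur out h
      cases l with
      | nil => simp [PySem.Chars.splitOn.go, pvSplitNl, pvConsHead]
      | cons c rest =>
          by_cases hc : c = '\n'
          · subst hc
            have hpre : List.isPrefixOf ['\n'] ('\n' :: rest) = true := by
              simp [List.isPrefixOf]
            simp only [PySem.Chars.splitOn.go, hpre, if_pos, List.length_cons,
              List.length_nil, List.drop_succ_cons, List.drop_zero]
            rw [ih rest [] (cur.reverse :: out) (by simpa using Nat.lt_of_succ_lt_succ h)]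
            simp only [pvSplitNl, pvConsHead, List.reverse_nil, List.nil_append,
              List.reverse_cons, List.append_assoc, List.singleton_append]
            cases hsp : pvSplitNl rest with
            | nil => exact absurd hsp (pvSplitNl_ne_nil rest)
            | cons q qs => simp
          · have hpre : List.isPrefixOf ['\n'] (c :: rest) = false := by
              simp [List.isPrefixOf]
              intro hcc; exact absurd hcc.symm hc
            simp only [PySem.Chars.splitOn.go]
            rw [if_neg (by simp [hpre])]
            rw [ih rest (c :: cur) out (by simpa using Nat.lt_of_succ_lt_succ h)]
            simp only [pvSplitNl, if_neg hc]
            cases hsp : pvSplitNl rest with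
            | nil => exact absurd hsp (pvSplitNl_ne_nil rest)
            | cons q qs => simp [pvConsHead]

theorem pvSplitOn_nl (l : List Char) :
    PySem.Chars.splitOn l ['\n'] = pvSplitNl l := by
  unfold PySem.Chars.splitOn
  rw [pvGo_char (l.length + 1) l [] [] (by omega)]
  cases hsp : pvSplitNl l with
  | nil => exact absurd hsp (pvSplitNl_ne_nil l)
  | cons q qs => simp [pvConsHead]

-- B's scan over a newline-free chunk just accumulates it
theorem pvReSplitHdr_chunk (cs : List Char) : ∀ (rest acc : List Char), '\n' ∉ cs →
    pvReSplitHdr (cs ++ rest) acc = pvReSplitHdr rest (acc ++ cs) := by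
  induction cs with
  | nil => intro rest acc _; simp
  | cons c cs ih =>
      intro rest acc h
      have hc : ¬ c = '\n' := fun hh => h (by simp [hh])
      simp only [List.cons_append, pvReSplitHdr]
      rw [if_neg (by simp [hc])]
      rw [ih rest (acc ++ [c]) (fun hm => h (by simp [hm]))]
      simp

-- a '\n'-free pattern reads the same on l and on l ++ '\n' :: t
theorem pvStartswith_append_nl (p : List Char) (hp : '\n' ∉ p) : ∀ (l t : List Char),
    PySem.Chars.startswith (l ++ '\n' :: t) p = PySem.Chars.startswith l p := by
  induction p with
  | nil => intro l t; simp [PySem.Chars.startswith, List.isPrefixOf]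
  | cons q qs ih =>
      intro l t
      have hq : ¬ q = '\n' := fun hh => hp (by simp [hh])
      cases l with
      | nil =>
          simp [PySem.Chars.startswith, List.isPrefixOf]
          intro hq'; exact absurd hq' hq
      | cons a l' =>
          have := ih (fun hm => hp (by simp [hm])) l' t
          simp only [PySem.Chars.startswith, List.isPrefixOf, List.cons_append] at this ⊢
          rw [this]

-- line-level recursion matching B's scan
def pvBLines : List Char → List (List Char) → List String
  | acc, [] => [String.ofList acc]
  | acc, l :: ls =>
      if PySem.Chars.startswith l ['#', '#', ' '] then
        String.ofList acc :: pvBLines l ls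
      else
        pvBLines (acc ++ '\n' :: l) ls

theorem pvReSplitHdr_lines (ls : List (List Char)) : ∀ (l acc : List Char),
    '\n' ∉ l → (∀ p ∈ ls, '\n' ∉ p) →
    pvReSplitHdr (List.intercalate ['\n'] (l :: ls)) acc = pvBLines (acc ++ l) ls := by
  induction ls with
  | nil =>
      intro l acc hl _
      rw [pvInter_singleton]
      have : pvReSplitHdr (l ++ []) acc = pvReSplitHdr [] (acc ++ l) :=
        pvReSplitHdr_chunk l [] acc hl
      simpa [pvBLines, pvReSplitHdr] using this
  | cons l' ls' ih =>
      intro l acc hl h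
      rw [pvInter_cons_cons]
      rw [show l ++ ['\n'] ++ List.intercalate ['\n'] (l' :: ls') =
          l ++ ('\n' :: List.intercalate ['\n'] (l' :: ls')) by simp]
      rw [pvReSplitHdr_chunk l _ acc hl]
      have hnl' : '\n' ∉ l' := h l' (by simp)
      have hrest : ∀ p ∈ ls', '\n' ∉ p := fun p hp => h p (by simp [hp])
      have hstart : PySem.Chars.startswith (List.intercalate ['\n'] (l' :: ls')) ['#', '#', ' '] =
          PySem.Chars.startswith l' ['#', '#', ' '] := by
        cases ls' with
        | nil => rw [pvInter_singleton]
        | cons a b =>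
            rw [pvInter_cons_cons]
            rw [show l' ++ ['\n'] ++ List.intercalate ['\n'] (a :: b) =
                l' ++ ('\n' :: List.intercalate ['\n'] (a :: b)) by simp]
            exact pvStartswith_append_nl ['#', '#', ' '] (by decide) l' _
      simp only [pvReSplitHdr, pvBLines]
      by_cases hs : PySem.Chars.startswith l' ['#', '#', ' '] = true
      · rw [if_pos (by simp [hstart, hs]), if_pos hs]
        rw [show pvReSplitHdr (List.intercalate ['\n'] (l' :: ls')) [] =
            pvBLines ([] ++ l') ls' from ih l' [] hnl' hrest]
        simp
      · rw [if_neg (by simp [hstart]; simpa using hs), if_neg hs]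
        rw [show pvReSplitHdr (List.intercalate ['\n'] (l' :: ls')) (acc ++ l ++ ['\n']) =
            pvBLines ((acc ++ l ++ ['\n']) ++ l') ls' from ih l' _ hnl' hrest]
        simp

-- A's loop body and its line-level recursion
def pvALines : List String → List String → List String
  | cur, [] => [PySem.Str.join "\n" cur]
  | cur, l :: ls =>
      if PySem.Str.startswith l "## " then
        PySem.Str.join "\n" cur :: pvALines [l] ls
      else
        pvALines (cur ++ [l]) ls

def pvStep (st : List String × List String) (line : String) : List String × List String :=
  let st := if PySem.Str.startswith line "## " && !st.2.isEmpty then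
      (st.1 ++ [PySem.Str.join "\n" st.2], ([] : List String)) else st
  (st.1, st.2 ++ [line])

theorem pvAFold (ls : List String) : ∀ (cards cur : List String), cur ≠ [] →
    (if !(ls.foldl pvStep (cards, cur)).2.isEmpty then
        (ls.foldl pvStep (cards, cur)).1 ++ [PySem.Str.join "\n" (ls.foldl pvStep (cards, cur)).2]
      else (ls.foldl pvStep (cards, cur)).1) =
      cards ++ pvALines cur ls := by
  induction ls with
  | nil =>
      intro cards cur h
      simp [pvALines, h]
  | cons l ls ih =>
      intro cards cur h
      by_cases hs : PySem.Str.startswith l "## " = true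
      · have hs' : PySem.Chars.startswith l.toList ['#', '#', ' '] = true := by
          simpa [PySem.Str.startswith] using hs
        have hstep : pvStep (cards, cur) l = (cards ++ [PySem.Str.join "\n" cur], [l]) := by
          simp [pvStep, hs', h]
        simp only [List.foldl_cons, hstep]
        rw [ih (cards ++ [PySem.Str.join "\n" cur]) [l] (by simp)]
        simp [pvALines, hs']
      · have hs' : PySem.Chars.startswith l.toList ['#', '#', ' '] = false := by
          simp only [PySem.Str.startswith] at hs
          simpa using hs
        have hstep : pvStep (cards, cur) l = (cards, cur ++ [l]) := by
          simp [pvStep, hs']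
        simp only [List.foldl_cons, hstep]
        rw [ih cards (cur ++ [l]) (by simp)]
        simp [pvALines, hs']

-- the two line-level recursions agree
theorem pvALines_eq_pvBLines (ls : List (List Char)) : ∀ (cur : List String), cur ≠ [] →
    pvALines cur (ls.map String.ofList) =
      pvBLines (List.intercalate ['\n'] (cur.map String.toList)) ls := by
  induction ls with
  | nil =>
      intro cur h
      simp [pvALines, pvBLines, PySem.Str.join, PySem.Chars.join, String.ofList]
  | cons l ls ih =>
      intro cur h
      have hsw : PySem.Str.startswith (String.ofList l) "## " =
          PySem.Chars.startswith l ['#', '#', ' '] := by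
        simp [PySem.Str.startswith, String.toList_ofList]
      simp only [List.map_cons, pvALines, pvBLines, hsw]
      by_cases hs : PySem.Chars.startswith l ['#', '#', ' '] = true
      · rw [if_pos hs, if_pos hs]
        rw [ih [String.ofList l] (by simp)]
        simp [PySem.Str.join, PySem.Chars.join, pvInter_singleton, String.toList_ofList]
      · rw [if_neg hs, if_neg hs]
        rw [ih (cur ++ [String.ofList l]) (by simp)]
        congr 1
        rw [List.map_append, List.map_singleton, String.toList_ofList]
        rw [pvInter_append_singleton ['\n'] l (cur.map String.toList)
          (by simpa using h)]
        simp

-- ===== VERDICT (by name: the statement is the Claim_ definition above) =====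
theorem split_existing_headers_py_spec : Claim_equal_split_existing_headers_py := by
  intro text _
  unfold Spec_split_existing_headers_py
  unfold split_existing_headers_py split_existing_headers_py_alt
  have hsplit : PySem.Str.split? text "\n" =
      some ((pvSplitNl text.toList).map String.ofList) := by
    simp [PySem.Str.split?, PySem.Chars.split?, pvSplitOn_nl]
  simp only [hsplit, Option.getD_some]
  rw [show (fun (st : List String × List String) line =>
        ((if PySem.Str.startswith line "## " && !st.2.isEmpty then
          (st.1 ++ [PySem.Str.join "\n" st.2], ([] : List String)) else st).1,
         (if PySem.Str.startswith line "## " && !st.2.isEmpty then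
          (st.1 ++ [PySem.Str.join "\n" st.2], ([] : List String)) else st).2 ++ [line])) =
      pvStep from rfl]
  cases hsp : pvSplitNl text.toList with
  | nil => exact absurd hsp (pvSplitNl_ne_nil _)
  | cons l ls =>
      have hno := pvSplitNl_no_nl text.toList
      rw [hsp] at hno
      have hstep0 : pvStep ([], []) (String.ofList l) = ([], [String.ofList l]) := by
        simp [pvStep]
      rw [List.map_cons, List.foldl_cons, hstep0,
        pvAFold (ls.map String.ofList) [] [String.ofList l] (by simp)]
      rw [pvALines_eq_pvBLines ls [String.ofList l] (by simp)]
      have htext : text.toList = List.intercalate ['\n'] (l :: ls) := by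
        rw [← hsp, pvSplitNl_intercalate]
      rw [htext]
      rw [pvReSplitHdr_lines ls l [] (hno l (by simp)) (fun p hp => hno p (by simp [hp]))]
      simp [String.toList_ofList, pvInter_singleton]
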